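-- pv_equiv track=rewrite | github.com/headply/reddit_crawler | src/nlp/enrichment.py | _match_patterns
-- ===== SOURCE A (Python) =====
-- from typing import Any, Optional
--
-- def _match_patterns(text: str, patterns: dict[str, list[str]]) -> Optional[str]:
--     """Match text against a dictionary of patterns and return the best match.
--
--     Args:
--         text: Text to search in (lowercased).
--         patterns: Dictionary mapping category names to keyword lists.
--
--     Returns:
--         Best matching category name, or None.
--     """
--     text_lower = text.lower()
--     scores: dict[str, int] = {}
--     for category, keywords in patterns.items():
--         count = sum(1 for kw in keywords if kw in text_lower)
--         if count > 0:
--             scores[category] = count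
--     if scores:
--         return max(scores, key=scores.get)  # type: ignore[arg-type]
--     return None
-- ===== SOURCE B (Python) =====
-- from typing import Optional
--
-- def _match_patterns(text: str, patterns: dict[str, list[str]]) -> Optional[str]:
--     text_lower = text.lower()
--     # collect the distinct keywords and the distinct keyword lengths
--     keywords = set()
--     for kws in patterns.values():
--         keywords.update(kws)
--     lengths = sorted({len(kw) for kw in keywords})
--     # single left-to-right scan of the text: at each position, look up the
--     # window of each keyword length in the keyword hash set
--     found = set()
--     for i in range(len(text_lower) + 1):
--         for L in lengths:
--             w = text_lower[i:i + L]
--             if w in keywords: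
--                 found.add(w)
--     # pick the first category with the highest number of present keywords
--     best: Optional[str] = None
--     best_count = 0
--     for category, kws in patterns.items():
--         count = sum(1 for kw in kws if kw in found)
--         if count > best_count:
--             best, best_count = category, count
--     return best
-- ===== Notes on version B (the rewrite author's own statement) =====
-- stated objective: faster
-- what changed: B inverts the matching direction: instead of running a substring search over the text for every keyword of every category, it builds a hash set of all distinct keywords plus the sorted list of distinct keyword lengths, makes ONE left-to-right scan of the text looking each length-L window up in that set to collect the keywords that occur, and then selects the winning category with a running-best accumulator instead of A's score dict followed by max(scores, key=scores.get).
import Mathlib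
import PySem

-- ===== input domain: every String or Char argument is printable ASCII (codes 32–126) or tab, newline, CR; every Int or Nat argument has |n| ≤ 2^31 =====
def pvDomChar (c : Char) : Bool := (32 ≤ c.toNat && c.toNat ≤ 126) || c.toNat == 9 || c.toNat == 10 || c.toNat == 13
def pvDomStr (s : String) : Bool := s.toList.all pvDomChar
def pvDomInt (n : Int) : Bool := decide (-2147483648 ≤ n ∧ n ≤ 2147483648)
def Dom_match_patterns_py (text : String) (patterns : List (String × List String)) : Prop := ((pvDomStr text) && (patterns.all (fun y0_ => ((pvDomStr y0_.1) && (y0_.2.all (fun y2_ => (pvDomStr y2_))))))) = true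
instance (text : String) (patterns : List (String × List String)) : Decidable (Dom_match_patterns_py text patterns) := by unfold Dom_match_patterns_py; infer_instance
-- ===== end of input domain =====

-- B inverts the matching direction: one left-to-right scan of the text looks each keyword-length
-- window up in a hash set of all keywords, and a running-best accumulator replaces A's score dict
-- plus max() pass (objective: faster — measured faster in a timing run; same result proved).

-- ===== PORT A =====
-- the dict argument arrives as an assoc list; PySem.Dict.ofList is the exact Python dict construction
def match_patterns_py (text : String) (patterns : List (String × List String)) : Option String :=
  let textLower := PySem.Str.lower text
  let scores : PySem.Dict String Int :=
    (PySem.Dict.ofList patterns).items.foldl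
      (fun sc p =>
        let count : Int := (p.2.map (fun kw => if PySem.Str.isIn kw textLower then (1 : Int) else 0)).sum
        if count > 0 then sc.insert p.1 count else sc)
      PySem.Dict.empty
  -- max(scores, key=scores.get): every key iterated is present in scores, so scores.get = getD _ 0 here (exact)
  if scores.items = [] then none
  else PySem.List.max? scores.keys (fun k => scores.getD k 0)

-- ===== PORT B =====
def match_patterns_py_alt (text : String) (patterns : List (String × List String)) : Option String :=
  let textLower := PySem.Str.lower text
  let items := (PySem.Dict.ofList patterns).items
  -- keywords = set(); for kws in patterns.values(): keywords.update(kws)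
  let keywords : PySem.Set String := items.foldl (fun s p => PySem.Set.update s p.2) PySem.Set.empty
  -- lengths = sorted({len(kw) for kw in keywords})
  let lengths : List Int :=
    PySem.List.sorted (PySem.Set.ofList (keywords.map (fun kw => PySem.Str.len kw))) (fun x => x) false
  -- found = set(); for i in range(len(text_lower)+1): for L in lengths: w = text_lower[i:i+L]; if w in keywords: found.add(w)
  let found : PySem.Set String :=
    (PySem.List.pyRange 0 (PySem.Str.len textLower + 1) 1).foldl
      (fun f i =>
        lengths.foldl
          (fun f L =>
            let w := PySem.Str.slice textLower (some i) (some (i + L))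
            if PySem.Set.contains keywords w then PySem.Set.add f w else f)
          f)
      PySem.Set.empty
  -- running best: first category with the highest count of keywords present in found
  (items.foldl
    (fun (acc : Option String × Int) p =>
      let count : Int := (p.2.countP (fun kw => PySem.Set.contains found kw) : Int)
      if count > acc.2 then (some p.1, count) else acc)
    (none, 0)).1

-- ===== PRECONDITION & SPEC =====
def Spec_match_patterns_py (text : String) (patterns : List (String × List String)) (out : Option String) : Prop := out = match_patterns_py_alt text patterns
instance (text : String) (patterns : List (String × List String)) (out : Option String) : Decidable (Spec_match_patterns_py text patterns out) := by unfold Spec_match_patterns_py; infer_instance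

-- ===== CLAIM (what is proved, stated in full; the proofs are below) =====
def Claim_equal_match_patterns_py : Prop := ∀ (text : String) (patterns : List (String × List String)), Dom_match_patterns_py text patterns → Spec_match_patterns_py text patterns (match_patterns_py text patterns)

-- ===== LEMMAS AND PROOFS =====

-- named, let-free restatements of the two ports' pieces (each equal to its port by definitional unfolding)
def pvCA (tl : String) (p : String × List String) : Int :=
  (p.2.map (fun kw => if PySem.Str.isIn kw tl then (1 : Int) else 0)).sum

def pvScores (tl : String) (items : List (String × List String)) : PySem.Dict String Int :=
  items.foldl (fun sc p => if pvCA tl p > 0 then sc.insert p.1 (pvCA tl p) else sc) PySem.Dict.empty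

def pvA (text : String) (patterns : List (String × List String)) : Option String :=
  if (pvScores (PySem.Str.lower text) (PySem.Dict.ofList patterns).items).items = [] then none
  else PySem.List.max? (pvScores (PySem.Str.lower text) (PySem.Dict.ofList patterns).items).keys
    (fun k => (pvScores (PySem.Str.lower text) (PySem.Dict.ofList patterns).items).getD k 0)

def pvKw (items : List (String × List String)) : PySem.Set String :=
  items.foldl (fun s p => PySem.Set.update s p.2) PySem.Set.empty

def pvLens (kws : PySem.Set String) : List Int :=
  PySem.List.sorted (PySem.Set.ofList (kws.map (fun kw => PySem.Str.len kw))) (fun x => x) false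

def pvFound (tl : String) (kws : PySem.Set String) (lens : List Int) : PySem.Set String :=
  (PySem.List.pyRange 0 (PySem.Str.len tl + 1) 1).foldl
    (fun f i =>
      lens.foldl
        (fun f L =>
          if PySem.Set.contains kws (PySem.Str.slice tl (some i) (some (i + L))) then
            PySem.Set.add f (PySem.Str.slice tl (some i) (some (i + L)))
          else f)
        f)
    PySem.Set.empty

def pvCB (found : PySem.Set String) (p : String × List String) : Int :=
  (p.2.countP (fun kw => PySem.Set.contains found kw) : Int)

def pvBstep (c : (String × List String) → Int) (acc : Option String × Int) (p : String × List String) :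
    Option String × Int :=
  if c p > acc.2 then (some p.1, c p) else acc

def pvB (text : String) (patterns : List (String × List String)) : Option String :=
  ((PySem.Dict.ofList patterns).items.foldl
    (pvBstep (pvCB (pvFound (PySem.Str.lower text) (pvKw (PySem.Dict.ofList patterns).items)
      (pvLens (pvKw (PySem.Dict.ofList patterns).items)))))
    (none, 0)).1

theorem pvA_eq (text : String) (patterns : List (String × List String)) :
    match_patterns_py text patterns = pvA text patterns := rfl

theorem pvB_eq (text : String) (patterns : List (String × List String)) :
    match_patterns_py_alt text patterns = pvB text patterns := rfl

-- membership through any fold whose step adds (at most) the elements described by P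
theorem pv_mem_foldl {α : Type} (f : PySem.Set String → α → PySem.Set String)
    (P : α → String → Prop) (hf : ∀ s a x, x ∈ f s a ↔ x ∈ s ∨ P a x) :
    ∀ (l : List α) (s : PySem.Set String) (x : String),
      x ∈ l.foldl f s ↔ x ∈ s ∨ ∃ a ∈ l, P a x := by
  intro l
  induction l with
  | nil => intro s x; simp
  | cons a t ih =>
    intro s x
    rw [List.foldl_cons, ih, hf]
    constructor
    · rintro ((h | h) | ⟨b, hb, hP⟩)
      · exact Or.inl h
      · exact Or.inr ⟨a, by simp, h⟩
      · exact Or.inr ⟨b, by simp [hb], hP⟩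
    · rintro (h | ⟨b, hb, hP⟩)
      · exact Or.inl (Or.inl h)
      · rcases List.mem_cons.1 hb with rfl | hb
        · exact Or.inl (Or.inr hP)
        · exact Or.inr ⟨b, hb, hP⟩

-- every keyword of every category is in the keyword set, and conversely
theorem pv_mem_kw (items : List (String × List String)) (x : String) :
    x ∈ pvKw items ↔ ∃ p ∈ items, x ∈ p.2 := by
  unfold pvKw
  have h := pv_mem_foldl (fun s p => PySem.Set.update s p.2) (fun p x => x ∈ p.2)
    (fun s p x => PySem.Set.mem_update s p.2 x) items PySem.Set.empty x
  simpa using h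

-- what the scan collects: exactly the slices of tl (at an in-range start, with a listed length) that are keywords
theorem pv_mem_found (tl : String) (kws : PySem.Set String) (lens : List Int) (x : String) :
    x ∈ pvFound tl kws lens ↔
      ∃ i ∈ PySem.List.pyRange 0 (PySem.Str.len tl + 1) 1, ∃ L ∈ lens,
        PySem.Str.slice tl (some i) (some (i + L)) = x ∧ PySem.Set.contains kws x = true := by
  unfold pvFound
  rw [pv_mem_foldl _
    (fun i x => ∃ L ∈ lens, PySem.Str.slice tl (some i) (some (i + L)) = x ∧
      PySem.Set.contains kws x = true) ?_]
  · simp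
  · intro s i x
    rw [pv_mem_foldl _
      (fun L x => PySem.Str.slice tl (some i) (some (i + L)) = x ∧
        PySem.Set.contains kws x = true) ?_]
    intro s L x
    by_cases hc : PySem.Set.contains kws (PySem.Str.slice tl (some i) (some (i + L))) = true
    · rw [if_pos hc, PySem.Set.mem_add]
      constructor
      · rintro (h | rfl)
        · exact Or.inl h
        · exact Or.inr ⟨rfl, hc⟩
      · rintro (h | ⟨rfl, _⟩)
        · exact Or.inl h
        · exact Or.inr rfl
    · rw [if_neg hc]
      constructor
      · exact Or.inl
      · rintro (h | ⟨rfl, hx⟩)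
        · exact h
        · exact absurd hx hc

-- the scan finds a keyword iff Python's substring test does
theorem pv_found_iff_isIn (tl : String) (kws : PySem.Set String) (kw : String) (hkw : kw ∈ kws) :
    kw ∈ pvFound tl kws (pvLens kws) ↔ PySem.Str.isIn kw tl = true := by
  rw [pv_mem_found]
  have hlen : PySem.Str.len kw ∈ pvLens kws := by
    unfold pvLens
    rw [PySem.List.mem_sorted, PySem.Set.mem_ofList]
    exact List.mem_map_of_mem hkw
  constructor
  · rintro ⟨i, hi, L, hL, hslice, -⟩
    -- any collected window is a genuine slice of tl, hence an infix
    rw [PySem.List.mem_pyRange_one] at hi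
    -- L is the length of some keyword, hence nonnegative
    have hL0 : 0 ≤ L := by
      unfold pvLens at hL
      rw [PySem.List.mem_sorted, PySem.Set.mem_ofList] at hL
      obtain ⟨w, -, rfl⟩ := List.mem_map.1 hL
      simp [PySem.Str.len_eq]
    rw [PySem.Str.isIn_iff_infix]
    have : (PySem.Str.slice tl (some i) (some (i + L))).toList = kw.toList := by rw [hslice]
    rw [PySem.Str.toList_slice, PySem.Chars.slice_eq_listSlice,
      PySem.List.slice_toNat _ hi.1 (by omega)] at this
    rw [← this]
    exact (List.take_prefix _ _).isInfix.trans (List.drop_suffix _ _).isInfix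
  · intro hin
    have hct : PySem.Set.contains kws kw = true := (PySem.Set.contains_iff kws kw).2 hkw
    -- Python's substring test gives a start position j with kw a prefix of tl.drop j
    have hinf : ∃ j, kw.toList <+: tl.toList.drop j := by
      rw [PySem.Chars.exists_prefix_drop_iff_isIn]
      rw [PySem.Str.isIn_iff_infix] at hin
      rw [PySem.Chars.isIn_iff_infix]
      exact hin
    obtain ⟨j, hj⟩ := hinf
    -- clamp j into range: past the end, kw must be [] and position tl.length works too
    have hj' : kw.toList <+: tl.toList.drop (min j tl.toList.length) := by
      by_cases hle : j ≤ tl.toList.length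
      · rwa [min_eq_left hle]
      · have : tl.toList.drop j = [] := List.drop_eq_nil_of_le (by omega)
        rw [this, List.prefix_nil] at hj
        simp [hj]
    set i : Nat := min j tl.toList.length with hidef
    refine ⟨(i : Int), ?_, PySem.Str.len kw, hlen, ?_, hct⟩
    · rw [PySem.List.mem_pyRange_one]
      have : PySem.Str.len tl = (tl.toList.length : Int) := by
        simp [PySem.Str.len_eq]
      constructor
      · positivity
      · rw [this]
        have : i ≤ tl.toList.length := min_le_right _ _
        omega
    · apply String.toList_inj.mp
      rw [PySem.Str.toList_slice, PySem.Chars.slice_eq_listSlice]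
      have hklen : PySem.Str.len kw = (kw.toList.length : Int) := by
        simp [PySem.Str.len_eq]
      rw [hklen, PySem.List.slice_natCast_add]
      exact ((List.prefix_iff_eq_take.1 hj').symm)

-- B skips the non-positive categories: the fold equals the fold over the positive ones
theorem pv_skip_nonpos (c : (String × List String) → Int) :
    ∀ (l : List (String × List String)) (acc : Option String × Int), 0 ≤ acc.2 →
    l.foldl (pvBstep c) acc
      = (l.filter (fun p => decide (c p > 0))).foldl (pvBstep c) acc := by
  intro l
  induction l with
  | nil => intro acc _; rfl
  | cons p t ih =>
    intro acc hacc
    by_cases hc : c p > 0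
    · have hf : List.filter (fun p => decide (c p > 0)) (p :: t)
          = p :: List.filter (fun p => decide (c p > 0)) t := by
        simp [hc]
      rw [hf]
      simp only [List.foldl_cons, pvBstep]
      by_cases hstep : c p > acc.2
      · rw [if_pos hstep]
        exact ih (some p.1, c p) (by simpa using le_of_lt hc)
      · rw [if_neg hstep]
        exact ih acc hacc
    · have hf : List.filter (fun p => decide (c p > 0)) (p :: t)
          = List.filter (fun p => decide (c p > 0)) t := by
        simp [hc]
      rw [hf]
      have hstep : ¬ c p > acc.2 := by omega
      simp only [List.foldl_cons, pvBstep, if_neg hstep]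
      exact ih acc hacc

-- A's score dict: conditional inserts over fresh distinct keys append exactly the positive entries
theorem pv_scores_items (c : (String × List String) → Int) :
    ∀ (l : List (String × List String)) (d : PySem.Dict String Int),
    (∀ p ∈ l, d.contains p.1 = false) → (l.map Prod.fst).Nodup →
    (l.foldl (fun sc p => if c p > 0 then sc.insert p.1 (c p) else sc) d).items
      = d.items ++ (l.filter (fun p => decide (c p > 0))).map (fun p => (p.1, c p)) := by
  intro l
  induction l with
  | nil => intro d _ _; simp
  | cons p t ih =>
    intro d hfresh hnd
    simp only [List.map_cons, List.nodup_cons] at hnd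
    by_cases hc : c p > 0
    · have hdp : d.contains p.1 = false := hfresh p (by simp)
      have hrest : ∀ q ∈ t, (d.insert p.1 (c p)).contains q.1 = false := by
        intro q hq
        rw [PySem.Dict.contains_insert]
        have : q.1 ≠ p.1 := by
          intro h; exact hnd.1 (h ▸ List.mem_map_of_mem hq)
        simp [this, hfresh q (by simp [hq])]
      have hf : List.filter (fun p => decide (c p > 0)) (p :: t)
          = p :: List.filter (fun p => decide (c p > 0)) t := by
        simp [hc]
      rw [hf]
      simp only [List.foldl_cons, if_pos hc]
      rw [ih _ hrest hnd.2, PySem.Dict.items_insert_of_not_contains _ _ hdp]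
      simp
    · have hf : List.filter (fun p => decide (c p > 0)) (p :: t)
          = List.filter (fun p => decide (c p > 0)) t := by
        simp [hc]
      rw [hf]
      simp only [List.foldl_cons, if_neg hc]
      exact ih _ (fun q hq => hfresh q (by simp [hq])) hnd.2

-- first-max selection: Python's max(..., key=g) fold equals B's running-best fold, on positive values
theorem pv_max_eq_best (g : String → Int) :
    ∀ (fl : List (String × Int)) (accB : Option String × Int),
    (∀ p ∈ fl, g p.1 = p.2) → (∀ p ∈ fl, 0 < p.2) →
    (accB.1 = none → accB.2 ≤ 0) → (∀ m, accB.1 = some m → g m = accB.2) →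
    fl.foldl (fun (acc : Option String) p =>
        match acc with
        | none => some p.1
        | some m => if g m < g p.1 then some p.1 else some m) accB.1
      = (fl.foldl (fun acc p => if p.2 > acc.2 then (some p.1, p.2) else acc) accB).1 := by
  intro fl
  induction fl with
  | nil => intro accB _ _ _ _; rfl
  | cons p t ih =>
    intro accB hg hpos hnone hsome
    have hgp : g p.1 = p.2 := hg p (by simp)
    have hp : 0 < p.2 := hpos p (by simp)
    simp only [List.foldl_cons]
    cases hacc : accB.1 with
    | none =>
      have hle := hnone hacc
      have hstep : p.2 > accB.2 := by omega
      rw [if_pos hstep]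
      have hm : (match (none : Option String) with
          | none => some p.1
          | some m => if g m < g p.1 then some p.1 else some m) = some p.1 := rfl
      rw [hm]
      exact ih (some p.1, p.2) (fun q hq => hg q (by simp [hq])) (fun q hq => hpos q (by simp [hq]))
        (by simp) (by simp [hgp])
    | some m =>
      have hgm : g m = accB.2 := hsome m hacc
      have hm : (match (some m : Option String) with
          | none => some p.1
          | some m => if g m < g p.1 then some p.1 else some m)
          = if g m < g p.1 then some p.1 else some m := rfl
      rw [hm]
      by_cases hlt : g m < g p.1
      · have hstep : p.2 > accB.2 := by omega
        rw [if_pos hlt, if_pos hstep]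
        exact ih (some p.1, p.2) (fun q hq => hg q (by simp [hq])) (fun q hq => hpos q (by simp [hq]))
          (by simp) (by simp [hgp])
      · have hstep : ¬ p.2 > accB.2 := by omega
        rw [if_neg hlt, if_neg hstep]
        have := ih accB (fun q hq => hg q (by simp [hq])) (fun q hq => hpos q (by simp [hq]))
          (fun h => hnone h) hsome
        rw [hacc] at this
        exact this

set_option maxHeartbeats 1000000 in
theorem pv_main (text : String) (patterns : List (String × List String)) :
    pvA text patterns = pvB text patterns := by
  unfold pvA pvB
  set tl := PySem.Str.lower text with htl
  set items := (PySem.Dict.ofList patterns).items with hitems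
  set kws := pvKw items with hkws
  set found := pvFound tl kws (pvLens kws) with hfound
  -- keyword membership in the scanned set agrees with the substring test
  have hmem : ∀ p ∈ items, ∀ kw ∈ p.2, PySem.Set.contains found kw = PySem.Str.isIn kw tl := by
    intro p hp kw hkw
    have hk : kw ∈ kws := (pv_mem_kw items kw).2 ⟨p, hp, hkw⟩
    by_cases hin : PySem.Str.isIn kw tl = true
    · rw [hin, PySem.Set.contains_iff found kw, hfound, pv_found_iff_isIn tl kws kw hk]
      exact hin
    · rw [eq_false_of_ne_true hin]
      by_contra hcon
      have hct : PySem.Set.contains found kw = true := by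
        cases h : PySem.Set.contains found kw
        · exact absurd h hcon
        · rfl
      rw [PySem.Set.contains_iff found kw, hfound, pv_found_iff_isIn tl kws kw hk] at hct
      exact hin hct
  -- B's per-category count equals A's
  have hcount : ∀ p ∈ items, pvCB found p = pvCA tl p := by
    intro p hp
    unfold pvCB pvCA
    rw [PySem.List.sum_map_ite_one_zero (fun kw => PySem.Str.isIn kw tl) p.2]
    congr 1
    exact List.countP_congr (fun kw hkw => by rw [hmem p hp kw hkw])
  -- rewrite B's fold to use A's count, then drop the non-positive categories
  rw [PySem.List.foldl_congr_mem items (pvBstep (pvCB found)) (pvBstep (pvCA tl)) (none, 0)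
      (by intro acc p hp; simp only [pvBstep, hcount p hp])]
  rw [pv_skip_nonpos (pvCA tl) items (none, 0) (by simp)]
  -- A's score dict items are exactly the positive entries
  have hnd : (items.map Prod.fst).Nodup := PySem.Dict.nodup_keys_ofList patterns
  set fl := items.filter (fun p => decide (pvCA tl p > 0)) with hfl
  have hsi : (pvScores tl items).items = fl.map (fun p => (p.1, pvCA tl p)) := by
    unfold pvScores
    exact pv_scores_items (pvCA tl) items PySem.Dict.empty
      (fun p _ => PySem.Dict.contains_empty p.1) hnd
  have hndfl : (fl.map Prod.fst).Nodup :=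
    List.Nodup.sublist (List.Sublist.map Prod.fst List.filter_sublist) hnd
  have hkeys : (pvScores tl items).keys = fl.map Prod.fst := by
    show (pvScores tl items).items.map Prod.fst = fl.map Prod.fst
    rw [hsi]; simp
  by_cases hflc : fl = []
  · rw [hsi, hflc]
    simp
  · have hne : (pvScores tl items).items ≠ [] := by
      rw [hsi]
      simpa using hflc
    rw [if_neg hne]
    set g : String → Int := fun k => (pvScores tl items).getD k 0 with hgdef
    set fl' := fl.map (fun p => (p.1, pvCA tl p)) with hfl'
    have hnd' : (fl'.map Prod.fst).Nodup := by
      rw [hfl', List.map_map]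
      exact hndfl
    have hg : ∀ p ∈ fl', g p.1 = p.2 := by
      intro p hp
      show (pvScores tl items).getD p.1 0 = p.2
      rw [PySem.Dict.getD_eq_get?_getD,
        PySem.Dict.get?_of_mem_items (pvScores tl items) (by rw [hsi]; exact hp)
          (by show ((pvScores tl items).items.map Prod.fst).Nodup; rw [hsi]; exact hnd')]
      rfl
    have hpos : ∀ p ∈ fl', 0 < p.2 := by
      intro p hp
      rw [hfl'] at hp
      obtain ⟨r, hr, hrp⟩ := List.mem_map.1 hp
      rw [hfl] at hr
      have := (List.mem_filter.1 hr).2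
      rw [← hrp]
      simpa using this
    have lhs_eq : PySem.List.max? (fl.map Prod.fst) g
        = fl'.foldl (fun (acc : Option String) p =>
            match acc with
            | none => some p.1
            | some m => if g m < g p.1 then some p.1 else some m) none := by
      unfold PySem.List.max?
      rw [hfl']
      simp only [List.foldl_map]
      congr 1
      funext x y
      cases x <;> rfl
    have rhs_eq : fl.foldl (pvBstep (pvCA tl)) (none, 0)
        = fl'.foldl (fun acc p => if p.2 > acc.2 then (some p.1, p.2) else acc) (none, 0) := by
      rw [hfl', List.foldl_map]
      rfl
    rw [hkeys, lhs_eq, rhs_eq]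
    exact pv_max_eq_best g fl' (none, (0 : Int)) hg hpos (by simp) (by simp)

-- ===== VERDICT (by name: the statement is the Claim_ definition above) =====
theorem match_patterns_py_spec : Claim_equal_match_patterns_py := by
  intro text patterns _
  show match_patterns_py text patterns = match_patterns_py_alt text patterns
  rw [pvA_eq, pvB_eq]
  exact pv_main text patterns
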